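-- pv_equiv track=rewrite | github.com/MarcelAssie/lsy_website | administration/models.py | filter_numeros
-- ===== SOURCE A (Python) =====
-- NUMEROS = [
--     ('1', '1'),
--     ('2', '2'),
--     ('3', '3'),
--     ('C1', 'C1'),
--     ('C2', 'C2'),
--     ('C3', 'C3'),
--     ('C4', 'C4'),
--     ('C5', 'C5'),
--     ('D1', 'D1'),
--     ('D2', 'D2'),
-- ]
--
-- def filter_numeros(niveau_code):
--     if niveau_code in ['4', '3']:
--         return [(num_code, num_desc) for num_code, num_desc in NUMEROS if num_code in ['1', '2', '3']]
--     elif niveau_code == '2':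
--         return [(num_code, num_desc) for num_code, num_desc in NUMEROS if num_code.startswith('C')]
--     elif niveau_code in ['1', 'T']:
--         return [(num_code, num_desc) for num_code, num_desc in NUMEROS if num_code.startswith('C') or num_code.startswith('D')]
--     else:
--         return []
-- ===== SOURCE B (Python) =====
-- NUMEROS = [
--     ('1', '1'),
--     ('2', '2'),
--     ('3', '3'),
--     ('C1', 'C1'),
--     ('C2', 'C2'),
--     ('C3', 'C3'),
--     ('C4', 'C4'),
--     ('C5', 'C5'),
--     ('D1', 'D1'),
--     ('D2', 'D2'),
-- ]
--
-- _ALLOWED = {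
--     '4': {'1', '2', '3'},
--     '3': {'1', '2', '3'},
--     '2': {'C1', 'C2', 'C3', 'C4', 'C5'},
--     '1': {'C1', 'C2', 'C3', 'C4', 'C5', 'D1', 'D2'},
--     'T': {'C1', 'C2', 'C3', 'C4', 'C5', 'D1', 'D2'},
-- }
--
-- def filter_numeros(niveau_code):
--     allowed = _ALLOWED.get(niveau_code, set())
--     return [(num_code, num_desc) for num_code, num_desc in NUMEROS if num_code in allowed]
-- ===== Notes on version B (the rewrite author's own statement) =====
-- stated objective: simpler
-- what changed: Replaces the four-branch if/elif chain with three distinct filter predicates (list membership, startswith, a disjunction of startswith) by a single table: a dict from niveau_code to the set of allowed num_codes (default empty), followed by one uniform membership-filter pass over NUMEROS.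
import Mathlib
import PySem

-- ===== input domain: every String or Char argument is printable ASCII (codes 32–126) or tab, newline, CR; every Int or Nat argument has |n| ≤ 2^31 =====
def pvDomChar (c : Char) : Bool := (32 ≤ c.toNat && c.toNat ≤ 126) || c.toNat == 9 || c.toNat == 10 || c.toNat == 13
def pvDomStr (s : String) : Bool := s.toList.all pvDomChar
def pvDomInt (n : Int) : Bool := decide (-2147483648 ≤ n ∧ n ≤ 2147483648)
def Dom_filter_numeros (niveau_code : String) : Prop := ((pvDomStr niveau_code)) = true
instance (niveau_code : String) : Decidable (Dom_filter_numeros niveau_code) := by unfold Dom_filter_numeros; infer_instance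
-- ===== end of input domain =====

-- B replaces A's if/elif chain of three different filter predicates by one table lookup
-- (niveau_code → allowed num_code set, default empty) and a single uniform filter (objective: simpler).

def NUMEROS : List (String × String) :=
  [("1", "1"), ("2", "2"), ("3", "3"), ("C1", "C1"), ("C2", "C2"),
   ("C3", "C3"), ("C4", "C4"), ("C5", "C5"), ("D1", "D1"), ("D2", "D2")]

-- ===== PORT A =====
def filter_numeros (niveau_code : String) : List (String × String) :=
  if niveau_code ∈ ["4", "3"] then
    NUMEROS.filter (fun p => p.1 ∈ ["1", "2", "3"])
  else if niveau_code = "2" then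
    NUMEROS.filter (fun p => PySem.Str.startswith p.1 "C")
  else if niveau_code ∈ ["1", "T"] then
    NUMEROS.filter (fun p => PySem.Str.startswith p.1 "C" || PySem.Str.startswith p.1 "D")
  else []

-- ===== PORT B =====
def ALLOWED : PySem.Dict String (PySem.Set String) :=
  PySem.Dict.ofList
    [("4", PySem.Set.ofList ["1", "2", "3"]),
     ("3", PySem.Set.ofList ["1", "2", "3"]),
     ("2", PySem.Set.ofList ["C1", "C2", "C3", "C4", "C5"]),
     ("1", PySem.Set.ofList ["C1", "C2", "C3", "C4", "C5", "D1", "D2"]),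
     ("T", PySem.Set.ofList ["C1", "C2", "C3", "C4", "C5", "D1", "D2"])]

def filter_numeros_alt (niveau_code : String) : List (String × String) :=
  let allowed := ALLOWED.getD niveau_code PySem.Set.empty
  NUMEROS.filter (fun p => PySem.Set.contains allowed p.1)

-- ===== PRECONDITION & SPEC =====
def Spec_filter_numeros (niveau_code : String) (out : List (String × String)) : Prop := out = filter_numeros_alt niveau_code
instance (niveau_code : String) (out : List (String × String)) : Decidable (Spec_filter_numeros niveau_code out) := by unfold Spec_filter_numeros; infer_instance

-- ===== CLAIM (what is proved, stated in full; the proofs are below) =====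
def Claim_equal_filter_numeros : Prop := ∀ (niveau_code : String), Dom_filter_numeros niveau_code → Spec_filter_numeros niveau_code (filter_numeros niveau_code)

-- ===== LEMMAS AND PROOFS =====

-- When niveau_code is none of the five table keys, B's lookup misses.
theorem allowed_get?_none (s : String) (h4 : s ≠ "4") (h3 : s ≠ "3") (h2 : s ≠ "2")
    (h1 : s ≠ "1") (hT : s ≠ "T") : ALLOWED.get? s = none := by
  have e4 : ("4" == s) = false := by simp; exact fun h => h4 h.symm
  have e3 : ("3" == s) = false := by simp; exact fun h => h3 h.symm
  have e2 : ("2" == s) = false := by simp; exact fun h => h2 h.symm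
  have e1 : ("1" == s) = false := by simp; exact fun h => h1 h.symm
  have eT : ("T" == s) = false := by simp; exact fun h => hT h.symm
  have hit : ALLOWED.items =
      [("4", ["1", "2", "3"]), ("3", ["1", "2", "3"]),
       ("2", ["C1", "C2", "C3", "C4", "C5"]),
       ("1", ["C1", "C2", "C3", "C4", "C5", "D1", "D2"]),
       ("T", ["C1", "C2", "C3", "C4", "C5", "D1", "D2"])] := by decide
  simp [PySem.Dict.get?, hit, List.find?, e4, e3, e2, e1, eT]

-- ===== VERDICT (by name: the statement is the Claim_ definition above) =====
theorem filter_numeros_spec : Claim_equal_filter_numeros := by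
  intro s _
  unfold Spec_filter_numeros
  by_cases h4 : s = "4"; · subst h4; decide
  by_cases h3 : s = "3"; · subst h3; decide
  by_cases h2 : s = "2"; · subst h2; decide
  by_cases h1 : s = "1"; · subst h1; decide
  by_cases hT : s = "T"; · subst hT; decide
  simp [filter_numeros, filter_numeros_alt, PySem.Dict.getD,
        allowed_get?_none s h4 h3 h2 h1 hT, h4, h3, h2, h1, hT]
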